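-- pv_equiv track=rewrite | github.com/Darshan-R-Gupta/Snake_game_A_star | Algo.py | top_check
-- ===== SOURCE A (Python) =====
-- def top_check(point1, point2, point3, point4, blocks, possible):
--     # POINT1 has to be head
--     # POINT2 has to be goal
--     top = False
--     for i in blocks:
--         if i[0] >= point1[0] and i[0] <= point4[0]:
--             if i[1] == point1[1]:
--                 top = True
--                 break
--     if top:
--         v1 = False
--         v2 = False
--         bottom = False
--         for i in blocks:
--             if i[0] >= point3[0] and i[0] <= point2[0]:
--                 if i[1] == point3[1]:
--                     bottom = True
--                     break
--         if bottom:
--             v1 = True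
--
--         left = False
--         for i in blocks:
--             if i[1] >= point1[1] and i[0] <= point3[1]:
--                 if i[0] == point1[0]:
--                     left = True
--                     break
--         if left:
--             v2 = True
--         return v1, v2
--     else:
--         return False, False
-- ===== SOURCE B (Python) =====
-- def top_check(point1, point2, point3, point4, blocks, possible):
--     # Single pass over blocks: maintain the three flags together.
--     top = bottom = left = False
--     for i in blocks:
--         if i[0] >= point1[0] and i[0] <= point4[0] and i[1] == point1[1]:
--             top = True
--         if i[0] >= point3[0] and i[0] <= point2[0] and i[1] == point3[1]:
--             bottom = True
--         if i[1] >= point1[1] and i[0] <= point3[1] and i[0] == point1[0]: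
--             left = True
--     return (bottom, left) if top else (False, False)
-- ===== Notes on version B (the rewrite author's own statement) =====
-- stated objective: simpler
-- what changed: Replaces A's three sequential break-on-hit scans of blocks (the last two only run after the first succeeds) by one single pass that maintains the three flags together and combines them at the end.
-- outside the precondition, e.g. on top_check((0, 0), (), (), (0,), [(5, 5)], []): A returns (False, False), B raises IndexError
import Mathlib
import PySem

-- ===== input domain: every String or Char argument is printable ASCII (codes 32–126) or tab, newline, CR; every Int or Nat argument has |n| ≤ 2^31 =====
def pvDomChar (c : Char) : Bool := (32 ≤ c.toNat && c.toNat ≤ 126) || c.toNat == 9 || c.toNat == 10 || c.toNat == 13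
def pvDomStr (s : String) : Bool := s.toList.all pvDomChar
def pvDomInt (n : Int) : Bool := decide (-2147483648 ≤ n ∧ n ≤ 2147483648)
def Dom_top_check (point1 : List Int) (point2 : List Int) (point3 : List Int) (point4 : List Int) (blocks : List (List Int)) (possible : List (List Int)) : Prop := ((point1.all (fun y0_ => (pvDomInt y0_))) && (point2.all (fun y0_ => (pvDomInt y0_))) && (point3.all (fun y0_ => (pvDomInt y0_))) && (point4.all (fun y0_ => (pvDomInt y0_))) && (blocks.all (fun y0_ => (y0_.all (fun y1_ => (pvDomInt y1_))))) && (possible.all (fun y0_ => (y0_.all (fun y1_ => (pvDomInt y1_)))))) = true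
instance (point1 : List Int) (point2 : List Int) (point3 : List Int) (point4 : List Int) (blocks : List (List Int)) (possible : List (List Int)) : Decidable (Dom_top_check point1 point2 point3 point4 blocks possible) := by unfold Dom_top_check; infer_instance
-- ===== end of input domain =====

-- B replaces A's three break-on-hit scans of `blocks` by one single pass maintaining all
-- three flags together (objective: simpler); return value only, neither mutates anything.

-- ===== PORT A =====
-- xs[k] with Python semantics; the default 0 is only reached outside Pre_top_check
-- (where the Python raises IndexError).
def pvG (xs : List Int) (k : Int) : Int := PySem.List.pyGetD xs k 0

-- first loop: `for i in blocks: if i[0] >= point1[0] and i[0] <= point4[0]: if i[1] == point1[1]: top = True; break`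
def loopTopA (point1 point4 : List Int) : List (List Int) → Bool
  | [] => false
  | i :: rest =>
    if pvG i 0 ≥ pvG point1 0 ∧ pvG i 0 ≤ pvG point4 0 then
      if pvG i 1 = pvG point1 1 then true else loopTopA point1 point4 rest
    else loopTopA point1 point4 rest

-- second loop (bottom)
def loopBottomA (point2 point3 : List Int) : List (List Int) → Bool
  | [] => false
  | i :: rest =>
    if pvG i 0 ≥ pvG point3 0 ∧ pvG i 0 ≤ pvG point2 0 then
      if pvG i 1 = pvG point3 1 then true else loopBottomA point2 point3 rest
    else loopBottomA point2 point3 rest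

-- third loop (left)
def loopLeftA (point1 point3 : List Int) : List (List Int) → Bool
  | [] => false
  | i :: rest =>
    if pvG i 1 ≥ pvG point1 1 ∧ pvG i 0 ≤ pvG point3 1 then
      if pvG i 0 = pvG point1 0 then true else loopLeftA point1 point3 rest
    else loopLeftA point1 point3 rest

def top_check (point1 : List Int) (point2 : List Int) (point3 : List Int) (point4 : List Int) (blocks : List (List Int)) (possible : List (List Int)) : Bool × Bool :=
  let top := loopTopA point1 point4 blocks
  if top then
    let v1 := if loopBottomA point2 point3 blocks then true else false
    let v2 := if loopLeftA point1 point3 blocks then true else false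
    (v1, v2)
  else (false, false)

-- ===== PORT B =====
-- single pass: fold over blocks carrying (top, bottom, left)
def stepB (point1 point2 point3 point4 : List Int) (acc : Bool × Bool × Bool) (i : List Int) : Bool × Bool × Bool :=
  ( acc.1 || decide (pvG i 0 ≥ pvG point1 0 ∧ pvG i 0 ≤ pvG point4 0 ∧ pvG i 1 = pvG point1 1)
  , acc.2.1 || decide (pvG i 0 ≥ pvG point3 0 ∧ pvG i 0 ≤ pvG point2 0 ∧ pvG i 1 = pvG point3 1)
  , acc.2.2 || decide (pvG i 1 ≥ pvG point1 1 ∧ pvG i 0 ≤ pvG point3 1 ∧ pvG i 0 = pvG point1 0) )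

def top_check_alt (point1 : List Int) (point2 : List Int) (point3 : List Int) (point4 : List Int) (blocks : List (List Int)) (possible : List (List Int)) : Bool × Bool :=
  let r := blocks.foldl (stepB point1 point2 point3 point4) (false, false, false)
  if r.1 then (r.2.1, r.2.2) else (false, false)

-- ===== PRECONDITION & SPEC =====
-- Pre_ excludes inputs where a block or a needed point coordinate is missing (list too
-- short): there the Python A raises IndexError, or returns only because an early break /
-- untaken branch skips the bad index while B's single full pass would itself raise.
def Pre_top_check (point1 : List Int) (point2 : List Int) (point3 : List Int) (point4 : List Int) (blocks : List (List Int)) (possible : List (List Int)) : Prop :=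
  blocks = [] ∨ (2 ≤ point1.length ∧ 1 ≤ point2.length ∧ 2 ≤ point3.length ∧ 1 ≤ point4.length ∧ ∀ b ∈ blocks, 2 ≤ b.length)
instance (point1 : List Int) (point2 : List Int) (point3 : List Int) (point4 : List Int) (blocks : List (List Int)) (possible : List (List Int)) : Decidable (Pre_top_check point1 point2 point3 point4 blocks possible) := by unfold Pre_top_check; infer_instance

def pvWitness_top_check : List Int × List Int × List Int × List Int × List (List Int) × List (List Int) :=
  ([0, 0], [3, 0], [0, 2], [3, 0], [[1, 0], [2, 2]], [])

def Spec_top_check (point1 : List Int) (point2 : List Int) (point3 : List Int) (point4 : List Int) (blocks : List (List Int)) (possible : List (List Int)) (out : Bool × Bool) : Prop := out = top_check_alt point1 point2 point3 point4 blocks possible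
instance (point1 : List Int) (point2 : List Int) (point3 : List Int) (point4 : List Int) (blocks : List (List Int)) (possible : List (List Int)) (out : Bool × Bool) : Decidable (Spec_top_check point1 point2 point3 point4 blocks possible out) := by unfold Spec_top_check; infer_instance

-- ===== CLAIM (what is proved, stated in full; the proofs are below) =====
def Claim_equal_top_check : Prop := ∀ (point1 : List Int) (point2 : List Int) (point3 : List Int) (point4 : List Int) (blocks : List (List Int)) (possible : List (List Int)), Dom_top_check point1 point2 point3 point4 blocks possible → Pre_top_check point1 point2 point3 point4 blocks possible → Spec_top_check point1 point2 point3 point4 blocks possible (top_check point1 point2 point3 point4 blocks possible)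

-- ===== LEMMAS AND PROOFS =====

theorem loopTopA_any (p1 p4 : List Int) (bs : List (List Int)) :
    loopTopA p1 p4 bs = bs.any (fun i => decide (pvG i 0 ≥ pvG p1 0 ∧ pvG i 0 ≤ pvG p4 0 ∧ pvG i 1 = pvG p1 1)) := by
  induction bs with
  | nil => rfl
  | cons i rest ih =>
    simp only [loopTopA, List.any_cons, ih]
    split_ifs with h1 h2
    · simp [h1.1, h1.2, h2]
    · have hne : ¬(pvG i 0 ≥ pvG p1 0 ∧ pvG i 0 ≤ pvG p4 0 ∧ pvG i 1 = pvG p1 1) :=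
        fun h => h2 h.2.2
      simp [hne]
    · have hne : ¬(pvG i 0 ≥ pvG p1 0 ∧ pvG i 0 ≤ pvG p4 0 ∧ pvG i 1 = pvG p1 1) :=
        fun h => h1 ⟨h.1, h.2.1⟩
      simp [hne]

theorem loopBottomA_any (p2 p3 : List Int) (bs : List (List Int)) :
    loopBottomA p2 p3 bs = bs.any (fun i => decide (pvG i 0 ≥ pvG p3 0 ∧ pvG i 0 ≤ pvG p2 0 ∧ pvG i 1 = pvG p3 1)) := by
  induction bs with
  | nil => rfl
  | cons i rest ih =>
    simp only [loopBottomA, List.any_cons, ih]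
    split_ifs with h1 h2
    · simp [h1.1, h1.2, h2]
    · have hne : ¬(pvG i 0 ≥ pvG p3 0 ∧ pvG i 0 ≤ pvG p2 0 ∧ pvG i 1 = pvG p3 1) :=
        fun h => h2 h.2.2
      simp [hne]
    · have hne : ¬(pvG i 0 ≥ pvG p3 0 ∧ pvG i 0 ≤ pvG p2 0 ∧ pvG i 1 = pvG p3 1) :=
        fun h => h1 ⟨h.1, h.2.1⟩
      simp [hne]

theorem loopLeftA_any (p1 p3 : List Int) (bs : List (List Int)) :
    loopLeftA p1 p3 bs = bs.any (fun i => decide (pvG i 1 ≥ pvG p1 1 ∧ pvG i 0 ≤ pvG p3 1 ∧ pvG i 0 = pvG p1 0)) := by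
  induction bs with
  | nil => rfl
  | cons i rest ih =>
    simp only [loopLeftA, List.any_cons, ih]
    split_ifs with h1 h2
    · have h3 : pvG p1 0 ≤ pvG p3 1 := h2 ▸ h1.2
      simp [h1.1, h2, h3]
    · have hne : ¬(pvG i 1 ≥ pvG p1 1 ∧ pvG i 0 ≤ pvG p3 1 ∧ pvG i 0 = pvG p1 0) :=
        fun h => h2 h.2.2
      simp [hne]
    · have hne : ¬(pvG i 1 ≥ pvG p1 1 ∧ pvG i 0 ≤ pvG p3 1 ∧ pvG i 0 = pvG p1 0) :=
        fun h => h1 ⟨h.1, h.2.1⟩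
      simp [hne]

theorem foldB_eq (p1 p2 p3 p4 : List Int) (bs : List (List Int)) (t b l : Bool) :
    bs.foldl (stepB p1 p2 p3 p4) (t, b, l) =
      ( t || bs.any (fun i => decide (pvG i 0 ≥ pvG p1 0 ∧ pvG i 0 ≤ pvG p4 0 ∧ pvG i 1 = pvG p1 1))
      , b || bs.any (fun i => decide (pvG i 0 ≥ pvG p3 0 ∧ pvG i 0 ≤ pvG p2 0 ∧ pvG i 1 = pvG p3 1))
      , l || bs.any (fun i => decide (pvG i 1 ≥ pvG p1 1 ∧ pvG i 0 ≤ pvG p3 1 ∧ pvG i 0 = pvG p1 0)) ) := by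
  induction bs generalizing t b l with
  | nil => simp
  | cons i rest ih => simp [stepB, ih, Bool.or_assoc]

theorem if_true_false_eq (b : Bool) : (if b = true then true else false) = b := by
  cases b <;> rfl

-- ===== VERDICT (by name: the statement is the Claim_ definition above) =====
theorem top_check_spec : Claim_equal_top_check := by
  intro p1 p2 p3 p4 blocks possible _ _
  show _ = _
  simp only [top_check, top_check_alt, foldB_eq, loopTopA_any, loopBottomA_any, loopLeftA_any,
    Bool.false_or, if_true_false_eq]
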